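-- pv_equiv track=rewrite | github.com/flound1129/patchmasta | midi/device.py | find_rk100s2_port
-- ===== SOURCE A (Python) =====
-- DEVICE_NAME_FRAGMENT = "RK-100S"
--
-- def find_rk100s2_port(ports: list[str]) -> int | None:
--     # Prefer the SOUND port — that's the internal synth, which handles SysEx dumps
--     for i, name in enumerate(ports):
--         if DEVICE_NAME_FRAGMENT in name and "SOUND" in name:
--             return i
--     # Fall back to any port matching the device name
--     for i, name in enumerate(ports):
--         if DEVICE_NAME_FRAGMENT in name:
--             return i
--     return None
-- ===== SOURCE B (Python) =====
-- DEVICE_NAME_FRAGMENT = "RK-100S"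
--
-- def find_rk100s2_port(ports: list[str]) -> int | None:
--     # One pass: return immediately on a SOUND match, remember the first
--     # fragment-only match as fallback.
--     fallback = None
--     for i, name in enumerate(ports):
--         if DEVICE_NAME_FRAGMENT in name:
--             if "SOUND" in name:
--                 return i
--             if fallback is None:
--                 fallback = i
--     return fallback
-- ===== Notes on version B (the rewrite author's own statement) =====
-- stated objective: simpler
-- what changed: Replaced A's two sequential priority scans over the list with a single pass that returns immediately on a SOUND match and keeps the first fragment-only index as a fallback.
import Mathlib
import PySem

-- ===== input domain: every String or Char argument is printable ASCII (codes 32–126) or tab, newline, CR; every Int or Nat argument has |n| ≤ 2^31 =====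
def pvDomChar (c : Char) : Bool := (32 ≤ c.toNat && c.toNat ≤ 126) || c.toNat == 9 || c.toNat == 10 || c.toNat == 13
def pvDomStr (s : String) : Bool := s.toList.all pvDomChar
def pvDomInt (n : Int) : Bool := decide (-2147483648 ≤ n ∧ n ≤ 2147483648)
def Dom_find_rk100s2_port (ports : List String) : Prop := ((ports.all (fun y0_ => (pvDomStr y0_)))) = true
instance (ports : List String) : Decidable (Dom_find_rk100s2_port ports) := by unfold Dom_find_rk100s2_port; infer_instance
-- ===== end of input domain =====

-- B replaces A's two sequential priority scans with one pass keeping a fallback index (objective: simpler).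


-- ===== PORT A =====
-- first loop of A: first index whose name contains both the fragment and "SOUND"
def pvScanSound : List String → Int → Option Int
  | [], _ => none
  | name :: rest, i =>
    if PySem.Str.isIn "RK-100S" name && PySem.Str.isIn "SOUND" name then some i
    else pvScanSound rest (i + 1)

-- second loop of A: first index whose name contains the fragment
def pvScanFrag : List String → Int → Option Int
  | [], _ => none
  | name :: rest, i =>
    if PySem.Str.isIn "RK-100S" name then some i
    else pvScanFrag rest (i + 1)

def find_rk100s2_port (ports : List String) : Option Int :=
  match pvScanSound ports 0 with
  | some i => some i
  | none => pvScanFrag ports 0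

-- ===== PORT B =====
-- single pass with fallback accumulator
def pvScanOnce : List String → Int → Option Int → Option Int
  | [], _, fb => fb
  | name :: rest, i, fb =>
    if PySem.Str.isIn "RK-100S" name then
      if PySem.Str.isIn "SOUND" name then some i
      else pvScanOnce rest (i + 1) (if fb = none then some i else fb)
    else pvScanOnce rest (i + 1) fb

def find_rk100s2_port_alt (ports : List String) : Option Int :=
  pvScanOnce ports 0 none

-- ===== PRECONDITION & SPEC =====
def Spec_find_rk100s2_port (ports : List String) (out : Option Int) : Prop := out = find_rk100s2_port_alt ports
instance (ports : List String) (out : Option Int) : Decidable (Spec_find_rk100s2_port ports out) := by unfold Spec_find_rk100s2_port; infer_instance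

-- ===== CLAIM (what is proved, stated in full; the proofs are below) =====
def Claim_equal_find_rk100s2_port : Prop := ∀ (ports : List String), Dom_find_rk100s2_port ports → Spec_find_rk100s2_port ports (find_rk100s2_port ports)

-- ===== LEMMAS AND PROOFS =====

-- The one-pass scan equals: first both-match, else the pending fallback, else the first fragment match.
theorem pvScanOnce_eq (l : List String) (i : Int) (fb : Option Int) :
    pvScanOnce l i fb =
      match pvScanSound l i with
      | some j => some j
      | none => match fb with
        | some f => some f
        | none => pvScanFrag l i := by
  induction l generalizing i fb with
  | nil => cases fb <;> simp [pvScanOnce, pvScanSound, pvScanFrag]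
  | cons name rest ih =>
    by_cases hf : PySem.Chars.isIn ['R','K','-','1','0','0','S'] name.toList = true
    · by_cases hs : PySem.Chars.isIn ['S','O','U','N','D'] name.toList = true
      · simp [pvScanOnce, pvScanSound, PySem.Str.isIn, hf, hs]
      · cases fb <;> simp [pvScanOnce, pvScanSound, pvScanFrag, PySem.Str.isIn, hf, hs, ih]
    · cases fb <;> simp [pvScanOnce, pvScanSound, pvScanFrag, PySem.Str.isIn, hf, ih]

-- ===== VERDICT (by name: the statement is the Claim_ definition above) =====
theorem find_rk100s2_port_spec : Claim_equal_find_rk100s2_port := by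
  intro ports _
  unfold Spec_find_rk100s2_port find_rk100s2_port find_rk100s2_port_alt
  rw [pvScanOnce_eq]
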